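-- pv_equiv track=rewrite | github.com/jaketurelli/dev_environment | examples/tic_tac_toe.py | state_transformations
-- ===== SOURCE A (Python) =====
-- def state_transformations(state, i):
--     if i == 0:
--         return ''.join(state[int(x)] for x in '630741852')  # clockwise 90 deg
--     if i == 1:
--         return ''.join(state[int(x)] for x in '876543210')  # clockwise 180 deg
--     if i == 2:
--         return ''.join(state[int(x)] for x in '258147036')  # clockwise 270 deg
--     if i == 3:
--         return ''.join(state[int(x)] for x in '210543876')  # mirror vertical axis
--     if i == 4:
--         return ''.join(state[int(x)] for x in '678345012')  # mirror horizontal axis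
--     if i == 5:
--         return ''.join(state[int(x)] for x in '036147258')  # mirror diagonal axis starting top left
--     if i == 6:
--         return ''.join(state[int(x)] for x in '852741630')  # mirror diagonal axis starting top right
-- ===== SOURCE B (Python) =====
-- def state_transformations(state, i):
--     # Geometric view: the board is a 3x3 grid; output cell (r, c) is read from
--     # the transformed source cell given by a per-symmetry coordinate map.
--     transforms = {
--         0: lambda r, c: (2 - c, r),          # clockwise 90 deg
--         1: lambda r, c: (2 - r, 2 - c),      # clockwise 180 deg
--         2: lambda r, c: (c, 2 - r),          # clockwise 270 deg
--         3: lambda r, c: (r, 2 - c),          # mirror vertical axis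
--         4: lambda r, c: (2 - r, c),          # mirror horizontal axis
--         5: lambda r, c: (c, r),              # main-diagonal transpose
--         6: lambda r, c: (2 - c, 2 - r),      # anti-diagonal transpose
--     }
--     f = transforms.get(i)
--     if f is None:
--         return None
--     return ''.join(state[3 * f(r, c)[0] + f(r, c)[1]]
--                    for r in range(3) for c in range(3))
-- ===== Notes on version B (the rewrite author's own statement) =====
-- stated objective: alternative
-- what changed: Replaces A's seven hard-coded 9-digit permutation strings by a geometric 3x3 decomposition: each output cell (r,c) is read from the source cell given by the symmetry's coordinate map (rotations, mirrors, transposes), selected from a small dict that yields None for i outside 0..6.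
import Mathlib
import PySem

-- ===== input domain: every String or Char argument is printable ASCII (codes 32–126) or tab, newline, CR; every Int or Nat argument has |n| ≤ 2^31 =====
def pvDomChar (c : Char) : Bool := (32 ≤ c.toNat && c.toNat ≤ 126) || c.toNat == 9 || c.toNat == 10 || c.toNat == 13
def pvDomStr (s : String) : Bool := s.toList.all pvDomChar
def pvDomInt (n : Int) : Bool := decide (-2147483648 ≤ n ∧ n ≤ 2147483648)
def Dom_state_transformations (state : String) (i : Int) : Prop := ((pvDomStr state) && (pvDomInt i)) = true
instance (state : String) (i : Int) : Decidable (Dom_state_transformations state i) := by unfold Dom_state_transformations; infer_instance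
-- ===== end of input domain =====

-- B views the board as a 3x3 grid and reads each output cell through a per-symmetry
-- coordinate map, instead of A's seven hard-coded permutation strings (objective: alternative).

-- ===== PORT A =====
-- ''.join(state[int(x)] for x in perm)  (lazy: first failing lookup raises = none)
def pvApplyPerm (state : String) (perm : String) : Option String :=
  (perm.toList.mapM (fun x =>
    (PySem.Int.ofStr? (String.mk [x])).bind (fun k => PySem.Str.pyGet? state k))).map String.mk

def state_transformations (state : String) (i : Int) : Option String :=
  if i = 0 then pvApplyPerm state "630741852"
  else if i = 1 then pvApplyPerm state "876543210"
  else if i = 2 then pvApplyPerm state "258147036"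
  else if i = 3 then pvApplyPerm state "210543876"
  else if i = 4 then pvApplyPerm state "678345012"
  else if i = 5 then pvApplyPerm state "036147258"
  else if i = 6 then pvApplyPerm state "852741630"
  else none

-- ===== PORT B =====
-- transforms = {0: ..., 6: ...}; f = transforms.get(i)
def pvTransforms : PySem.Dict Int (Int × Int → Int × Int) :=
  PySem.Dict.ofList
    [ (0, fun rc => (2 - rc.2, rc.1))
    , (1, fun rc => (2 - rc.1, 2 - rc.2))
    , (2, fun rc => (rc.2, 2 - rc.1))
    , (3, fun rc => (rc.1, 2 - rc.2))
    , (4, fun rc => (2 - rc.1, rc.2))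
    , (5, fun rc => (rc.2, rc.1))
    , (6, fun rc => (2 - rc.2, 2 - rc.1)) ]

def state_transformations_alt (state : String) (i : Int) : Option String :=
  match pvTransforms.get? i with
  | none => none
  | some f =>
    (((PySem.List.pyRange 0 3 1).flatMap (fun r =>
        (PySem.List.pyRange 0 3 1).map (fun c => (r, c)))).mapM (fun rc =>
          PySem.Str.pyGet? state (3 * (f rc).1 + (f rc).2))).map String.mk

-- ===== PRECONDITION & SPEC =====
-- Pre_ excludes exactly the inputs where A raises IndexError: i in 0..6 with len(state) < 9.
def Pre_state_transformations (state : String) (i : Int) : Prop :=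
  (0 ≤ i ∧ i ≤ 6) → 9 ≤ state.toList.length
instance (state : String) (i : Int) : Decidable (Pre_state_transformations state i) := by
  unfold Pre_state_transformations; infer_instance
def pvWitness_state_transformations : String × Int := ("XOXOXOXOX", 2)

def Spec_state_transformations (state : String) (i : Int) (out : Option String) : Prop := out = state_transformations_alt state i
instance (state : String) (i : Int) (out : Option String) : Decidable (Spec_state_transformations state i out) := by unfold Spec_state_transformations; infer_instance

-- ===== CLAIM (what is proved, stated in full; the proofs are below) =====
def Claim_equal_state_transformations : Prop := ∀ (state : String) (i : Int), Dom_state_transformations state i → Pre_state_transformations state i → Spec_state_transformations state i (state_transformations state i)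

-- ===== LEMMAS AND PROOFS =====

theorem st_eq_alt (state : String) (i : Int) :
    state_transformations state i = state_transformations_alt state i := by
  unfold state_transformations state_transformations_alt pvApplyPerm pvTransforms
  by_cases h0 : i = 0
  · subst h0; rfl
  by_cases h1 : i = 1
  · subst h1; rfl
  by_cases h2 : i = 2
  · subst h2; rfl
  by_cases h3 : i = 3
  · subst h3; rfl
  by_cases h4 : i = 4
  · subst h4; rfl
  by_cases h5 : i = 5
  · subst h5; rfl
  by_cases h6 : i = 6
  · subst h6; rfl
  simp [PySem.Dict.ofList, PySem.Dict.update, List.foldl, PySem.Dict.get?_insert,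
        PySem.Dict.get?_empty, h0, h1, h2, h3, h4, h5, h6]

-- ===== VERDICT (by name: the statement is the Claim_ definition above) =====
theorem state_transformations_spec : Claim_equal_state_transformations := by
  intro state i _ _
  unfold Spec_state_transformations
  exact st_eq_alt state i
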